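-- pv_equiv track=rewrite | github.com/Tarmoboy/Bayesian-localization | bayesilainen_paikannus.py | kaanna_liikkeet
-- ===== SOURCE A (Python) =====
-- def kaanna_liikkeet(liikkeet):
--     """
--     Kääntää annetun liikesarjan 90, 180 ja 270 asteella.
--
--     Parametrit
--     ----------
--     liikkeet : list[list[int]]
--         Lista liikkeistä, jotka ajoneuvo on suorittanut. Jokainen liike on
--         vektorimuodossa [dx, dy].
--
--     Palauttaa
--     -------
--     liikkeet90 : list[list[int]]
--         Alkuperäiset liikkeet käännettynä 90 asteella.
--     liikkeet180 : list[list[int]]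
--         Alkuperäiset liikkeet käännettynä 180 asteella.
--     liikkeet270 : list[list[int]]
--         Alkuperäiset liikkeet käännettynä 270 asteella.
--     """
--     # Listojen alustus
--     liikkeet90 = []
--     liikkeet180 = []
--     liikkeet270 = []
--     for x, y in liikkeet:
--         # 90 asteen kierto
--         liikkeet90.append([-y,x])
--         # 180 asteen kierto
--         liikkeet180.append([-x,-y])
--         # 270 asteen kierto
--         liikkeet270.append([y,-x])
--     return liikkeet90, liikkeet180, liikkeet270
-- ===== SOURCE B (Python) =====
-- def rotate90(v):
--     x, y = v
--     return [-y, x]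
--
-- def kaanna_liikkeet(liikkeet):
--     liikkeet90 = [rotate90(v) for v in liikkeet]
--     liikkeet180 = [rotate90(v) for v in liikkeet90]
--     liikkeet270 = [rotate90(v) for v in liikkeet180]
--     return liikkeet90, liikkeet180, liikkeet270
-- ===== Notes on version B (the rewrite author's own statement) =====
-- stated objective: simpler
-- what changed: Replaces the single fused loop maintaining three accumulators by one rotate90 helper applied in three chained passes, each list derived from the previous one.
import Mathlib
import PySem

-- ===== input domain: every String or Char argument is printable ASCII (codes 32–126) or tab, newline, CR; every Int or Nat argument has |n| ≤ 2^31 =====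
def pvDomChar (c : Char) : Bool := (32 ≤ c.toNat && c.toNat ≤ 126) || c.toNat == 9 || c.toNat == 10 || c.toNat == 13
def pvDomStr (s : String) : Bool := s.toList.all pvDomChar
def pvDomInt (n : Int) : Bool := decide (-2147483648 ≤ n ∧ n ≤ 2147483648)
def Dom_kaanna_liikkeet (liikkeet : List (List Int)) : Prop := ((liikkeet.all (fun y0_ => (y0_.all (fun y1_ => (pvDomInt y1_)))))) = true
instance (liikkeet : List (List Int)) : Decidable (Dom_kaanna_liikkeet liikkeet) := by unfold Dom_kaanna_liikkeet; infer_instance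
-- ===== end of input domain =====

-- B replaces A's fused three-accumulator loop by a rotate90 helper applied in three chained passes (simpler decomposition).

-- ===== PORT A =====
-- A's single loop appending to three accumulators; the 'for x, y in' unpacking
-- raises on inner lists of length ≠ 2 (those inputs are outside Pre_; the match
-- default [] is never reached inside Pre_).
def kaanna_liikkeet (liikkeet : List (List Int)) : List (List Int) × List (List Int) × List (List Int) :=
  liikkeet.foldl
    (fun acc v =>
      match v with
      | [x, y] => (acc.1 ++ [[-y, x]], acc.2.1 ++ [[-x, -y]], acc.2.2 ++ [[y, -x]])
      | _ => (acc.1 ++ [[]], acc.2.1 ++ [[]], acc.2.2 ++ [[]]))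
    ([], [], [])

-- ===== PORT B =====
-- rotate90 unpacks [x, y]; the default [] mirrors the raise case, outside Pre_.
def rotate90 (v : List Int) : List Int :=
  if v.length = 2 then [-(v.getD 1 0), v.getD 0 0] else []

def kaanna_liikkeet_alt (liikkeet : List (List Int)) : List (List Int) × List (List Int) × List (List Int) :=
  let liikkeet90 := liikkeet.map rotate90
  let liikkeet180 := liikkeet90.map rotate90
  let liikkeet270 := liikkeet180.map rotate90
  (liikkeet90, liikkeet180, liikkeet270)

-- ===== PRECONDITION & SPEC =====
-- Pre_ excludes inputs with an inner list of length ≠ 2, on which Python A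
-- raises ValueError at the 'for x, y in liikkeet' unpacking.
def Pre_kaanna_liikkeet (liikkeet : List (List Int)) : Prop :=
  liikkeet.all (fun v => v.length == 2) = true
instance (liikkeet : List (List Int)) : Decidable (Pre_kaanna_liikkeet liikkeet) := by
  unfold Pre_kaanna_liikkeet; infer_instance

def pvWitness_kaanna_liikkeet : List (List Int) := [[1, 2], [0, -3]]

def Spec_kaanna_liikkeet (liikkeet : List (List Int)) (out : List (List Int) × List (List Int) × List (List Int)) : Prop := out = kaanna_liikkeet_alt liikkeet
instance (liikkeet : List (List Int)) (out : List (List Int) × List (List Int) × List (List Int)) : Decidable (Spec_kaanna_liikkeet liikkeet out) := by unfold Spec_kaanna_liikkeet; infer_instance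

-- ===== CLAIM (what is proved, stated in full; the proofs are below) =====
def Claim_equal_kaanna_liikkeet : Prop := ∀ (liikkeet : List (List Int)), Dom_kaanna_liikkeet liikkeet → Pre_kaanna_liikkeet liikkeet → Spec_kaanna_liikkeet liikkeet (kaanna_liikkeet liikkeet)

-- ===== LEMMAS AND PROOFS =====
-- A's loop with generalized accumulators, expressed through B's rotate90.
theorem kaanna_loop_eq (liikkeet : List (List Int)) (a b c : List (List Int)) :
    liikkeet.foldl
      (fun acc v =>
        match v with
        | [x, y] => (acc.1 ++ [[-y, x]], acc.2.1 ++ [[-x, -y]], acc.2.2 ++ [[y, -x]])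
        | _ => (acc.1 ++ [[]], acc.2.1 ++ [[]], acc.2.2 ++ [[]]))
      (a, b, c)
    = (a ++ liikkeet.map rotate90,
       b ++ liikkeet.map (fun v => rotate90 (rotate90 v)),
       c ++ liikkeet.map (fun v => rotate90 (rotate90 (rotate90 v)))) := by
  induction liikkeet generalizing a b c with
  | nil => simp
  | cons v t ih =>
    match v with
    | [x, y] => simp [List.foldl_cons, ih, rotate90]
    | [] => simp [List.foldl_cons, ih, rotate90]
    | [x] => simp [List.foldl_cons, ih, rotate90]
    | x :: y :: z :: r => simp [List.foldl_cons, ih, rotate90]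

-- ===== VERDICT (by name: the statement is the Claim_ definition above) =====
theorem kaanna_liikkeet_spec : Claim_equal_kaanna_liikkeet := by
  intro liikkeet _ _
  unfold Spec_kaanna_liikkeet kaanna_liikkeet kaanna_liikkeet_alt
  rw [kaanna_loop_eq]
  simp [List.map_map, Function.comp]
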